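-- pv_equiv track=rewrite | github.com/cirosantilli/project-euler-solvers | solvers/386.py | antichain_width
-- ===== SOURCE A (Python) =====
-- def antichain_width(exps: tuple[int, ...]) -> int:
--     """
--     Given exponents a_i, return max coefficient of ∏ (1 + x + ... + x^{a_i}).
--     Small DP with sliding window.
--     """
--     if not exps:
--         return 1
--     dp = [1]
--     for a in exps:
--         new = [0] * (len(dp) + a)
--         window = 0
--         # new[k] = sum_{t=0..a} dp[k-t]
--         for k in range(len(new)):
--             if k < len(dp):
--                 window += dp[k]
--             if k - (a + 1) >= 0:
--                 window -= dp[k - (a + 1)]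
--             new[k] = window
--         dp = new
--     return max(dp)
-- ===== SOURCE B (Python) =====
-- def antichain_width(exps):
--     """
--     Max coefficient of prod (1 + x + ... + x^{a_i}).
--     Two-phase step: build a prefix-sum table of dp once, then read each new
--     coefficient off as a difference of two table entries (no running window).
--     """
--     dp = [1]
--     for a in exps:
--         pref = [0]
--         for c in dp:
--             pref.append(pref[-1] + c)
--         dp = [pref[min(k + 1, len(dp))] - pref[max(0, k - a)]
--               for k in range(len(dp) + a)]
--     return max(dp)
-- ===== Notes on version B (the rewrite author's own statement) =====
-- stated objective: alternative
-- what changed: Replaces the stateful sliding-window accumulator (one running add/subtract per output slot) with a two-phase step that first builds a prefix-sum table of dp and then reads each new coefficient off as a difference of two table entries, and drops the special empty-input branch; Pre_ restricts to the natural domain of nonnegative exponents.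
-- outside the precondition, e.g. on antichain_width((1, 1, -2)): A returns -1, B returns -2; on antichain_width((-1,)): A raises ValueError, B raises ValueError
import Mathlib
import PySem

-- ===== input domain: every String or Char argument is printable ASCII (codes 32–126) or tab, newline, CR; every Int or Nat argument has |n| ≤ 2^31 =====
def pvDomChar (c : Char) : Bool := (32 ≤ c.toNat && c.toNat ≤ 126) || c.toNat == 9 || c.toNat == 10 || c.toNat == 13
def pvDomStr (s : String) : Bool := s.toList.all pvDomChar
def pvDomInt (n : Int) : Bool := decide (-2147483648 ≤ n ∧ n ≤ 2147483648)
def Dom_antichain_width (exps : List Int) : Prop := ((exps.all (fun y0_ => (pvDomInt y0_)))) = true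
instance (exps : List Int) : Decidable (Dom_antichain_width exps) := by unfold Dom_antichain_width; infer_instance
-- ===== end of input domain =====

-- B replaces A's stateful sliding-window accumulator with a two-phase step:
-- build a prefix-sum table of dp once, then read each new coefficient off as a
-- difference of two table entries (objective: alternative algorithm, similar cost).


-- ===== PORT A =====
-- dp is kept as Array Int to mirror the O(1) indexing of the Python list.
-- inner loop: for k in range(len(new)) with running `window`; Python appends new[k] = window.
-- `dp.getD … 0` is exact: every index Python actually reads is in range on Pre_ inputs.
def aGo (dp : Array Int) (a : Int) : Nat → Nat → Int → Array Int → Array Int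
  | 0, _, _, new => new
  | n + 1, k, window, new =>
      let w1 := window + (if k < dp.size then dp.getD k 0 else 0)
      let w2 := w1 - (if 0 ≤ (k : Int) - (a + 1) then dp.getD ((k : Int) - (a + 1)).toNat 0 else 0)
      aGo dp a n (k + 1) w2 (new.push w2)

-- one `for a in exps` body: new has len(dp)+a slots, filled by the sliding window
def aStep (dp : Array Int) (a : Int) : Array Int :=
  aGo dp a ((dp.size : Int) + a).toNat 0 0 #[]

def antichain_width (exps : List Int) : Int :=
  if exps = [] then 1
  else (PySem.List.max? (exps.foldl aStep #[1]).toList (fun x => x)).getD 0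
  -- max(dp): Python raises on empty dp (only reachable outside Pre_); getD 0 is a dummy there

-- ===== PORT B =====
-- phase 1 of Source B's loop body: pref = [0]; for c in dp: pref.append(pref[-1] + c)
def bPref (dp : Array Int) : Array Int :=
  dp.foldl (fun P c => P.push (P.getD (P.size - 1) 0 + c)) #[0]

-- phase 2: dp = [pref[min(k+1, len(dp))] - pref[max(0, k-a)] for k in range(len(dp)+a)]
def bStep (dp : Array Int) (a : Int) : Array Int :=
  let P := bPref dp
  ((List.range ((dp.size : Int) + a).toNat).map (fun (k : Nat) =>
      P.getD (min (k + 1) dp.size) 0 - P.getD (max 0 ((k : Int) - a)).toNat 0)).toArray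

def antichain_width_alt (exps : List Int) : Int :=
  (PySem.List.max? (exps.foldl bStep #[1]).toList (fun x => x)).getD 0
  -- max(dp): raises in Python only on empty dp, outside Pre_

-- ===== PRECONDITION & SPEC =====
-- Pre_ restricts to the natural domain of nonnegative exponents: on lists with a
-- negative exponent A either raises ValueError (max of an empty dp) or returns a
-- leftover sliding-window artifact that is not a coefficient of any polynomial.
def Pre_antichain_width (exps : List Int) : Prop := ∀ a ∈ exps, 0 ≤ a
instance (exps : List Int) : Decidable (Pre_antichain_width exps) := by unfold Pre_antichain_width; infer_instance

def pvWitness_antichain_width : List Int := [2, 3]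

def Spec_antichain_width (exps : List Int) (out : Int) : Prop := out = antichain_width_alt exps
instance (exps : List Int) (out : Int) : Decidable (Spec_antichain_width exps out) := by unfold Spec_antichain_width; infer_instance

-- ===== CLAIM (what is proved, stated in full; the proofs are below) =====
def Claim_equal_antichain_width : Prop := ∀ (exps : List Int), Dom_antichain_width exps → Pre_antichain_width exps → Spec_antichain_width exps (antichain_width exps)

-- ===== LEMMAS AND PROOFS =====

-- gI dp i = dp[i] when 0 ≤ i < len dp, else 0 (the guarded coefficient)
def gI (dp : Array Int) (i : Int) : Int :=
  if 0 ≤ i ∧ i < (dp.size : Int) then dp.getD i.toNat 0 else 0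

-- cI dp a m = Σ_{t=0..a} gI dp (m-t): the true value of output slot m
def cI (dp : Array Int) (a : Int) (m : Int) : Int :=
  ((List.range (a + 1).toNat).map (fun (t : Nat) => gI dp (m - (t : Int)))).sum

-- sI dp i = dp[0] + … + dp[i-1], with i clamped into [0, len dp]
def sI (dp : Array Int) (i : Int) : Int :=
  (dp.toList.take (min i (dp.size : Int)).toNat).sum

-- scanAux s l = running sums of l starting from s (spec of phase 1 of B)
def scanAux (s : Int) : List Int → List Int
  | [] => []
  | c :: t => (s + c) :: scanAux (s + c) t

theorem gI_neg (dp : Array Int) (i : Int) (h : i < 0) : gI dp i = 0 := by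
  unfold gI; rw [if_neg]; omega

theorem cI_neg (dp : Array Int) (a m : Int) (h : m < 0) : cI dp a m = 0 := by
  unfold cI
  have : ∀ t ∈ List.range (a + 1).toNat, gI dp (m - (t : Int)) = 0 := by
    intro t _; exact gI_neg _ _ (by omega)
  rw [List.map_congr_left this]
  simp

-- sliding update law: c(m+1) = c(m) + g(m+1) - g(m-a)
theorem cI_step (dp : Array Int) (a m : Int) (ha : 0 ≤ a) :
    cI dp a (m + 1) = cI dp a m + gI dp (m + 1) - gI dp (m - a) := by
  unfold cI
  obtain ⟨b, hb⟩ : ∃ b : Nat, (a + 1).toNat = b + 1 := ⟨a.toNat, by omega⟩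
  have hba : (b : Int) = a := by omega
  rw [hb]
  conv_lhs => rw [List.range_succ_eq_map]
  conv_rhs => rw [List.range_succ]
  simp only [List.map_cons, List.sum_cons, List.map_map, List.map_append,
    List.sum_append]
  have h1 : List.map ((fun (t : Nat) => gI dp (m + 1 - (t : Int))) ∘ Nat.succ) (List.range b)
      = List.map (fun (t : Nat) => gI dp (m - (t : Int))) (List.range b) := by
    apply List.map_congr_left; intro t _
    simp only [Function.comp_apply]
    congr 1; push_cast; ring
  rw [h1, hba]
  simp
  ring

-- the per-iteration window increment of A equals gI at index k
theorem add_eq_gI (dp : Array Int) (k : Nat) :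
    (if k < dp.size then dp.getD k 0 else 0) = gI dp (k : Int) := by
  unfold gI
  by_cases h : k < dp.size
  · rw [if_pos h, if_pos (by constructor <;> omega)]
    simp
  · rw [if_neg h, if_neg (by omega)]

-- the per-iteration window decrement of A equals gI at index k-(a+1)
theorem sub_eq_gI (dp : Array Int) (i : Int) :
    (if 0 ≤ i then dp.getD i.toNat 0 else 0) = gI dp i := by
  unfold gI
  by_cases h : 0 ≤ i
  · rw [if_pos h]
    by_cases h2 : i < (dp.size : Int)
    · rw [if_pos ⟨h, h2⟩]
    · rw [if_neg (by omega)]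
      simp only [Array.getD]
      rw [dif_neg (by omega)]
  · rw [if_neg h, if_neg (by omega)]

-- prefix-sum difference law: s(i+1) = s(i) + g(i)
theorem sI_succ (dp : Array Int) (i : Int) : sI dp (i + 1) = sI dp i + gI dp i := by
  unfold sI gI
  by_cases hneg : i < 0
  · rw [if_neg (by omega)]
    have h1 : (min (i + 1) (dp.size : Int)).toNat = 0 := by omega
    have h2 : (min i (dp.size : Int)).toNat = 0 := by omega
    rw [h1, h2]; simp
  · by_cases hlt : i < (dp.size : Int)
    · rw [if_pos ⟨by omega, hlt⟩]
      have h1 : (min (i + 1) (dp.size : Int)).toNat = i.toNat + 1 := by omega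
      have h2 : (min i (dp.size : Int)).toNat = i.toNat := by omega
      rw [h1, h2]
      have hx : i.toNat < dp.toList.length := by simp; omega
      rw [List.sum_take_succ _ _ hx]
      congr 1
      simp only [Array.getD]
      rw [dif_pos (by omega)]
      simp
    · rw [if_neg (by omega)]
      have h1 : (min (i + 1) (dp.size : Int)).toNat = dp.size := by omega
      have h2 : (min i (dp.size : Int)).toNat = dp.size := by omega
      rw [h1, h2]; simp

-- B's closed form: slot k of the new dp is s(k+1) - s(k-a), and it equals cI
theorem cI_eq_sI (dp : Array Int) (a : Int) (ha : 0 ≤ a) :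
    ∀ k : Nat, cI dp a (k : Int) = sI dp ((k : Int) + 1) - sI dp ((k : Int) - a) := by
  have hs0 : ∀ i : Int, i ≤ 0 → sI dp i = 0 := by
    intro i hi; unfold sI
    have : (min i (dp.size : Int)).toNat = 0 := by omega
    rw [this]; simp
  intro k
  induction k with
  | zero =>
      have h := cI_step dp a (-1) ha
      rw [cI_neg dp a (-1) (by norm_num), gI_neg dp (-1 - a) (by omega)] at h
      norm_num at h
      rw [Nat.cast_zero, h]
      rw [show (0 : Int) + 1 = 0 + 1 by ring, sI_succ dp 0, hs0 0 le_rfl,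
        hs0 (0 - a) (by omega)]
      ring
  | succ k ih =>
      have h := cI_step dp a (k : Int) ha
      rw [ih] at h
      push_cast
      rw [h, sI_succ dp ((k : Int) + 1), show (k : Int) + 1 - a = ((k : Int) - a) + 1 by ring,
        sI_succ dp ((k : Int) - a)]
      ring

-- phase 1 of B builds exactly the running sums
theorem pref_toList : ∀ (l : List Int) (P : Array Int), 0 < P.size →
    (l.foldl (fun P c => P.push (P.getD (P.size - 1) 0 + c)) P).toList
      = P.toList ++ scanAux (P.getD (P.size - 1) 0) l := by
  intro l
  induction l with
  | nil => intro P _; simp [scanAux]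
  | cons c t ih =>
      intro P hP
      simp only [List.foldl_cons, scanAux]
      rw [ih _ (by simp)]
      have hlast : (P.push (P.getD (P.size - 1) 0 + c)).getD ((P.push (P.getD (P.size - 1) 0 + c)).size - 1) 0
          = P.getD (P.size - 1) 0 + c := by
        simp only [Array.getD, Array.size_push]
        rw [dif_pos (by omega)]
        simp
      rw [hlast]
      simp [List.append_assoc]

-- reading the running-sum list at i gives the i-term prefix sum
theorem scan_getD : ∀ (l : List Int) (s : Int) (i : Nat), i ≤ l.length →
    (s :: scanAux s l).getD i 0 = s + (l.take i).sum := by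
  intro l
  induction l with
  | nil =>
      intro s i hi
      have h0 : i = 0 := by simpa using hi
      subst h0; simp
  | cons c t ih =>
      intro s i hi
      match i with
      | 0 => simp
      | j + 1 =>
          have : (s :: scanAux s (c :: t)).getD (j + 1) 0 = ((s + c) :: scanAux (s + c) t).getD j 0 := by
            simp [scanAux, List.getD]
          rw [this, ih (s + c) j (by simpa using hi)]
          simp [List.take_succ_cons]
          ring

theorem arr_getD (a : Array Int) (i : Nat) : a.getD i 0 = a.toList.getD i 0 := by
  rcases Nat.lt_or_ge i a.size with h | h
  · simp [Array.getD, h, List.getD]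
  · simp [Array.getD, Nat.not_lt.mpr h, List.getD]

-- bPref read at a clamped index is sI
theorem bPref_getD (dp : Array Int) (i : Nat) (hi : i ≤ dp.size) :
    (bPref dp).getD i 0 = (dp.toList.take i).sum := by
  unfold bPref
  rw [show dp.foldl (fun P c => P.push (P.getD (P.size - 1) 0 + c)) #[0]
      = dp.toList.foldl (fun P c => P.push (P.getD (P.size - 1) 0 + c)) #[0] from
      (Array.foldl_toList _).symm]
  rw [arr_getD]
  rw [pref_toList dp.toList #[0] (by simp)]
  have h0 : (#[0] : Array Int).getD ((#[0] : Array Int).size - 1) 0 = 0 := by decide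
  rw [h0]
  have : (#[(0 : Int)]).toList ++ scanAux 0 dp.toList = (0 : Int) :: scanAux 0 dp.toList := by
    simp
  rw [this, scan_getD dp.toList 0 i (by simpa using hi)]
  ring

-- each entry of B's new dp equals cI
theorem bEntry_eq (dp : Array Int) (a : Int) (ha : 0 ≤ a) (k : Nat)
    (hk : (k : Int) < (dp.size : Int) + a) :
    (bPref dp).getD (min (k + 1) dp.size) 0 - (bPref dp).getD (max 0 ((k : Int) - a)).toNat 0
      = cI dp a (k : Int) := by
  rw [cI_eq_sI dp a ha k]
  have e1 : (bPref dp).getD (min (k + 1) dp.size) 0 = sI dp ((k : Int) + 1) := by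
    rw [bPref_getD dp _ (by omega)]
    unfold sI
    rw [show (min ((k : Int) + 1) (dp.size : Int)).toNat = min (k + 1) dp.size from by omega]
  have e2 : (bPref dp).getD (max 0 ((k : Int) - a)).toNat 0 = sI dp ((k : Int) - a) := by
    rw [bPref_getD dp _ (by omega)]
    unfold sI
    rw [show (min ((k : Int) - a) (dp.size : Int)).toNat = (max 0 ((k : Int) - a)).toNat from by omega]
  rw [e1, e2]

-- A's window loop pushes exactly the values cI k, cI (k+1), …
theorem aGo_eq (dp : Array Int) (a : Int) (ha : 0 ≤ a) :
    ∀ (n k : Nat) (w : Int) (new : Array Int), w = cI dp a ((k : Int) - 1) →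
      (aGo dp a n k w new).toList
        = new.toList ++ (List.range n).map (fun (j : Nat) => cI dp a ((k : Int) + (j : Int))) := by
  intro n
  induction n with
  | zero => intro k w new _; simp [aGo]
  | succ n ih =>
      intro k w new hw
      have hstep : w + (if k < dp.size then dp.getD k 0 else 0)
          - (if 0 ≤ (k : Int) - (a + 1) then dp.getD ((k : Int) - (a + 1)).toNat 0 else 0)
          = cI dp a (k : Int) := by
        rw [add_eq_gI, sub_eq_gI, hw]
        have := cI_step dp a ((k : Int) - 1) ha
        have h1 : (k : Int) - 1 + 1 = (k : Int) := by ring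
        have h2 : (k : Int) - 1 - a = (k : Int) - (a + 1) := by ring
        rw [h1, h2] at this
        omega
      show (aGo dp a n (k + 1) _ (new.push _)).toList = _
      rw [hstep]
      rw [ih (k + 1) (cI dp a (k : Int)) (new.push (cI dp a (k : Int))) (by push_cast; ring_nf)]
      rw [List.range_succ_eq_map, List.map_cons, List.map_map]
      rw [Array.toList_push, List.append_assoc]
      congr 1
      refine List.cons_eq_cons.mpr ⟨by simp, ?_⟩
      apply List.map_congr_left
      intro j _
      simp only [Function.comp_apply]
      congr 1
      push_cast
      ring

-- the two loop bodies agree on every nonnegative exponent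
theorem step_eq (dp : Array Int) (a : Int) (ha : 0 ≤ a) : aStep dp a = bStep dp a := by
  apply Array.toList_inj.mp
  unfold aStep bStep
  rw [aGo_eq dp a ha _ 0 0 #[] (by rw [cI_neg dp a _ (by norm_num)])]
  simp only [List.nil_append]
  apply List.map_congr_left
  intro k hk
  have hk' : (k : Int) < (dp.size : Int) + a := by
    rw [List.mem_range] at hk
    omega
  rw [show ((0 : Nat) : Int) + (k : Int) = (k : Int) by simp]
  exact (bEntry_eq dp a ha k hk').symm

theorem foldl_eq (exps : List Int) : ∀ dp : Array Int, (∀ a ∈ exps, 0 ≤ a) →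
    exps.foldl aStep dp = exps.foldl bStep dp := by
  induction exps with
  | nil => intro dp _; rfl
  | cons a rest ih =>
      intro dp h
      simp only [List.foldl_cons]
      rw [step_eq dp a (h a (List.mem_cons_self))]
      exact ih _ (fun x hx => h x (List.mem_cons_of_mem a hx))

-- ===== VERDICT (by name: the statement is the Claim_ definition above) =====
theorem antichain_width_spec : Claim_equal_antichain_width := by
  intro exps _ hpre
  unfold Spec_antichain_width antichain_width antichain_width_alt
  by_cases he : exps = []
  · subst he; rfl
  · rw [if_neg he, foldl_eq exps #[1] hpre]
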